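-- pv_equiv track=rewrite | github.com/yashsiwacha/YAAN | backend/core/leetcode.py | map_topics_to_learning_paths
-- ===== SOURCE A (Python) =====
-- from typing import Dict, List, Optional, Any
--
-- TOPIC_MAPPINGS = {
--     "Arrays & Strings": ["Array", "String", "Hash Table"],
--     "Dynamic Programming": ["Dynamic Programming"],
--     "Trees & Graphs": ["Tree", "Binary Tree", "Graph", "Binary Search Tree", "Depth-First Search", "Breadth-First Search"],
--     "System Design": ["Design", "System Design"]
-- }
--
-- def map_topics_to_learning_paths(topics: Dict[str, int]) -> Dict[str, int]:
--     """Map LeetCode topics to learning path categories"""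
--     path_counts = {
--         "Arrays & Strings": 0,
--         "Dynamic Programming": 0,
--         "Trees & Graphs": 0,
--         "System Design": 0
--     }
--
--     for path_name, topic_list in TOPIC_MAPPINGS.items():
--         for topic in topic_list:
--             if topic in topics:
--                 path_counts[path_name] += topics[topic]
--
--     return path_counts
-- ===== SOURCE B (Python) =====
-- # B: no mutable counter dict -- each path's total is computed directly by one
-- # comprehension over TOPIC_MAPPINGS that sums the matching input counts (simpler).
-- from typing import Dict
--
-- TOPIC_MAPPINGS = {
--     "Arrays & Strings": ["Array", "String", "Hash Table"],
--     "Dynamic Programming": ["Dynamic Programming"],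
--     "Trees & Graphs": ["Tree", "Binary Tree", "Graph", "Binary Search Tree", "Depth-First Search", "Breadth-First Search"],
--     "System Design": ["Design", "System Design"]
-- }
--
-- def map_topics_to_learning_paths(topics: Dict[str, int]) -> Dict[str, int]:
--     def total(names):
--         return sum(count for topic, count in topics.items() if topic in names)
--     return {path: total(names) for path, names in TOPIC_MAPPINGS.items()}
-- ===== Notes on version B (the rewrite author's own statement) =====
-- stated objective: simpler
-- what changed: B drops A's mutable counter dict and nested accumulation: it returns a dict comprehension over TOPIC_MAPPINGS whose value for each path is a direct sum of the input counts whose topic belongs to that path's list.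
import Mathlib
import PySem

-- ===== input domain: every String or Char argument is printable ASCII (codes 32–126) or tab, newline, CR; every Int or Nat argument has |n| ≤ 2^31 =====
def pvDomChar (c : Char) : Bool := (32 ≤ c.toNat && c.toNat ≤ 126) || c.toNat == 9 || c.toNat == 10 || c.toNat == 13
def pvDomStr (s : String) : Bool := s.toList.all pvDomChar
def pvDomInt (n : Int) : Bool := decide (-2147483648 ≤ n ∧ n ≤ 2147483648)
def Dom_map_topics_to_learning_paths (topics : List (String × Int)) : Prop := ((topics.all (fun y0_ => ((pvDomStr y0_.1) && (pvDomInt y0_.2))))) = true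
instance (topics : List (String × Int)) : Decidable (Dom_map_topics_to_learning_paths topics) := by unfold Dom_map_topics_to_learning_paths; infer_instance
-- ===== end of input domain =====

-- B drops A's mutable counter dict: each path's total is computed directly by one
-- comprehension over TOPIC_MAPPINGS summing the matching input counts (simpler).

-- ===== PORT A =====
-- TOPIC_MAPPINGS, in insertion order (shared module constant)
def pvTopicMappings : List (String × List String) :=
  [("Arrays & Strings", ["Array", "String", "Hash Table"]),
   ("Dynamic Programming", ["Dynamic Programming"]),
   ("Trees & Graphs", ["Tree", "Binary Tree", "Graph", "Binary Search Tree", "Depth-First Search", "Breadth-First Search"]),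
   ("System Design", ["Design", "System Design"])]

def map_topics_to_learning_paths (topics : List (String × Int)) : List (String × Int) :=
  let td : PySem.Dict String Int := PySem.Dict.mk topics
  let path_counts : PySem.Dict String Int :=
    PySem.Dict.mk [("Arrays & Strings", 0), ("Dynamic Programming", 0),
                   ("Trees & Graphs", 0), ("System Design", 0)]
  (pvTopicMappings.foldl (fun pc pt =>
      pt.2.foldl (fun pc t =>
        if td.contains t then pc.modify pt.1 0 (· + td.getD t 0) else pc) pc)
    path_counts).items

-- ===== PORT B =====
-- total(names) = sum(count for topic, count in topics.items() if topic in names)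
def pvTotal (topics : List (String × Int)) (names : List String) : Int :=
  ((topics.filter (fun kv => names.contains kv.1)).map (fun kv => kv.2)).sum

-- {path: total(names) for path, names in TOPIC_MAPPINGS.items()} — the four path
-- keys are distinct, so the comprehension is the association list in this order.
def map_topics_to_learning_paths_alt (topics : List (String × Int)) : List (String × Int) :=
  pvTopicMappings.map (fun pn => (pn.1, pvTotal topics pn.2))

-- ===== PRECONDITION & SPEC =====
-- The association list encodes a Python dict, so Pre_ requires distinct keys: a
-- duplicate-key list is not representable as A's dict input (A's keyed lookup
-- would see only the first occurrence while B's sums see every occurrence).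
def Pre_map_topics_to_learning_paths (topics : List (String × Int)) : Prop :=
  (topics.map Prod.fst).Nodup
instance (topics : List (String × Int)) : Decidable (Pre_map_topics_to_learning_paths topics) := by
  unfold Pre_map_topics_to_learning_paths; infer_instance

def pvWitness_map_topics_to_learning_paths : (List (String × Int)) :=
  [("Array", 3), ("Graph", 2), ("Recursion", 1)]

def Spec_map_topics_to_learning_paths (topics : List (String × Int)) (out : List (String × Int)) : Prop := out = map_topics_to_learning_paths_alt topics
instance (topics : List (String × Int)) (out : List (String × Int)) : Decidable (Spec_map_topics_to_learning_paths topics out) := by unfold Spec_map_topics_to_learning_paths; infer_instance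

-- ===== CLAIM (what is proved, stated in full; the proofs are below) =====
def Claim_equal_map_topics_to_learning_paths : Prop := ∀ (topics : List (String × Int)), Dom_map_topics_to_learning_paths topics → Pre_map_topics_to_learning_paths topics → Spec_map_topics_to_learning_paths topics (map_topics_to_learning_paths topics)

-- ===== LEMMAS AND PROOFS =====

def pvG (topics : List (String × Int)) (t : String) : Int := (PySem.Dict.mk topics).getD t 0

theorem modify_id (pc : PySem.Dict String Int) (p : String)
    (hnd : pc.keys.Nodup) (hp : pc.contains p = true) :
    pc.modify p 0 (fun x => x) = pc := by
  apply PySem.Dict.ext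
  rw [PySem.Dict.modify, PySem.Dict.items_insert_of_contains (h := by simpa using hp)]
  nth_rewrite 2 [← List.map_id pc.items]
  apply List.map_congr_left
  intro q hq
  by_cases h : q.1 = p
  · subst h
    have := PySem.Dict.getD_of_mem_items (h := hq) (hnd := hnd) (d0 := (0 : Int))
    simp [this]
  · simp [h]

theorem branch_collapse (td : PySem.Dict String Int) (p : String) (ts : List String)
    (pc : PySem.Dict String Int) (hnd : pc.keys.Nodup) (hp : pc.contains p = true) :
    ts.foldl (fun pc t => if td.contains t then pc.modify p 0 (· + td.getD t 0) else pc) pc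
      = ts.foldl (fun pc t => pc.modify p 0 (· + td.getD t 0)) pc := by
  induction ts generalizing pc with
  | nil => rfl
  | cons t ts ih =>
    simp only [List.foldl]
    have hstep : (if td.contains t then pc.modify p 0 (· + td.getD t 0) else pc)
        = pc.modify p 0 (· + td.getD t 0) := by
      by_cases h : td.contains t = true
      · simp [h]
      · simp only [Bool.not_eq_true] at h
        rw [PySem.Dict.getD_of_not_contains (h := h)]
        simp [h, modify_id pc p hnd hp]
    rw [hstep]
    refine ih _ ?_ ?_
    · rw [PySem.Dict.modify]; exact PySem.Dict.nodup_keys_insert _ _ _ hnd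
    · rw [PySem.Dict.contains_modify]; simp [hp]

theorem keys_modify_of_contains (pc : PySem.Dict String Int) (p : String) (f : Int → Int)
    (hp : pc.contains p = true) : (pc.modify p 0 f).keys = pc.keys := by
  rw [PySem.Dict.keys_modify, PySem.Dict.keys_insert_of_contains (h := hp)]

theorem inner_keys (td : PySem.Dict String Int) (p : String) (ts : List String)
    (pc : PySem.Dict String Int) (hp : pc.contains p = true) :
    (ts.foldl (fun pc t => pc.modify p 0 (· + td.getD t 0)) pc).keys = pc.keys := by
  induction ts generalizing pc with
  | nil => rfl
  | cons t ts ih =>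
    simp only [List.foldl]
    rw [ih _ (by rw [PySem.Dict.contains_modify]; simp [hp])]
    exact keys_modify_of_contains _ _ _ hp

theorem outer_collapse (td : PySem.Dict String Int) (l : List (String × List String))
    (pc : PySem.Dict String Int) (hnd : pc.keys.Nodup)
    (hl : ∀ pt ∈ l, pc.contains pt.1 = true) :
    l.foldl (fun pc pt => pt.2.foldl (fun pc t => if td.contains t then pc.modify pt.1 0 (· + td.getD t 0) else pc) pc) pc
      = l.foldl (fun pc pt => pt.2.foldl (fun pc t => pc.modify pt.1 0 (· + td.getD t 0)) pc) pc := by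
  induction l generalizing pc with
  | nil => rfl
  | cons pt l ih =>
    simp only [List.foldl]
    rw [branch_collapse td pt.1 pt.2 pc hnd (hl pt (by simp))]
    have hkeys := inner_keys td pt.1 pt.2 pc (hl pt (by simp))
    refine ih _ ?_ ?_
    · rw [hkeys]; exact hnd
    · intro q hq
      rw [PySem.Dict.contains_iff_mem_keys, hkeys, ← PySem.Dict.contains_iff_mem_keys]
      exact hl q (by simp [hq])

theorem A_eval (topics : List (String × Int)) :
    map_topics_to_learning_paths topics =
      [("Arrays & Strings", pvG topics "Array" + pvG topics "String" + pvG topics "Hash Table"),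
       ("Dynamic Programming", pvG topics "Dynamic Programming"),
       ("Trees & Graphs", pvG topics "Tree" + pvG topics "Binary Tree" + pvG topics "Graph"
          + pvG topics "Binary Search Tree" + pvG topics "Depth-First Search" + pvG topics "Breadth-First Search"),
       ("System Design", pvG topics "Design" + pvG topics "System Design")] := by
  unfold map_topics_to_learning_paths
  dsimp only
  rw [outer_collapse _ _ _ (by decide) (by decide)]
  simp [pvTopicMappings, pvG, PySem.Dict.modify, PySem.Dict.items_insert, PySem.Dict.getD,
        PySem.Dict.get?, PySem.Dict.contains]

def pvSum (P : List String) (topics : List (String × Int)) : Int :=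
  (topics.map (fun kv => if kv.1 ∈ P then kv.2 else 0)).sum

def pvKeySum (t : String) (topics : List (String × Int)) : Int :=
  (topics.map (fun kv => if kv.1 = t then kv.2 else 0)).sum

theorem key_sum (t : String) (topics : List (String × Int))
    (hnd : (topics.map Prod.fst).Nodup) : pvG topics t = pvKeySum t topics := by
  induction topics with
  | nil => simp [pvG, pvKeySum, PySem.Dict.getD, PySem.Dict.get?]
  | cons kv xs ih =>
    simp only [List.map_cons, List.nodup_cons] at hnd
    rw [pvG, PySem.Dict.getD_eq_get?_getD, PySem.Dict.get?_mk_cons]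
    by_cases h : kv.1 = t
    · subst h
      simp only [beq_self_eq_true, if_pos, Option.getD_some, pvKeySum, List.map_cons,
        List.sum_cons]
      have hz : ((xs.map (fun kv' => if kv'.1 = kv.1 then kv'.2 else 0)).sum : Int) = 0 := by
        apply List.sum_eq_zero
        intro x hx
        simp only [List.mem_map] at hx
        obtain ⟨q, hq, rfl⟩ := hx
        have : q.1 ≠ kv.1 := by
          intro he
          exact hnd.1 (by exact List.mem_map.2 ⟨q, hq, he⟩)
        simp [this]
      omega
    · have hb : (kv.1 == t) = false := by simp [h]
      rw [hb]
      simp only [Bool.false_eq_true, if_false]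
      rw [← PySem.Dict.getD_eq_get?_getD]
      have hih : ({ items := xs } : PySem.Dict String Int).getD t 0 = pvKeySum t xs := ih hnd.2
      rw [hih]
      simp [pvKeySum, h]

theorem sum_split (t : String) (P : List String) (ht : t ∉ P)
    (topics : List (String × Int)) :
    pvSum (t :: P) topics = pvKeySum t topics + pvSum P topics := by
  induction topics with
  | nil => simp [pvSum, pvKeySum]
  | cons kv xs ih =>
    simp only [pvSum, pvKeySum, List.map_cons, List.sum_cons] at *
    rw [ih]
    by_cases h : kv.1 = t
    · simp [h, ht]; omega
    · by_cases h2 : kv.1 ∈ P <;> simp [h, h2] <;> omega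

theorem total_eq (G : List String) (topics : List (String × Int)) :
    pvTotal topics G = pvSum G topics := by
  induction topics with
  | nil => simp [pvTotal, pvSum]
  | cons kv xs ih =>
    by_cases h : kv.1 ∈ G
    · simp only [pvTotal, pvSum, List.filter_cons, List.map_cons, List.sum_cons] at *
      simp [h] at *
      omega
    · simp only [pvTotal, pvSum, List.filter_cons, List.map_cons, List.sum_cons] at *
      simp [h] at *
      omega

theorem B_eval (topics : List (String × Int)) : map_topics_to_learning_paths_alt topics =
    [("Arrays & Strings", pvSum ["Array", "String", "Hash Table"] topics),
     ("Dynamic Programming", pvSum ["Dynamic Programming"] topics),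
     ("Trees & Graphs", pvSum ["Tree", "Binary Tree", "Graph", "Binary Search Tree", "Depth-First Search", "Breadth-First Search"] topics),
     ("System Design", pvSum ["Design", "System Design"] topics)] := by
  simp [map_topics_to_learning_paths_alt, pvTopicMappings, total_eq]

theorem pvSum_nil (topics : List (String × Int)) : pvSum [] topics = 0 := by
  simp [pvSum]

theorem final (topics : List (String × Int)) (hpre : (topics.map Prod.fst).Nodup) :
    map_topics_to_learning_paths topics = map_topics_to_learning_paths_alt topics := by
  rw [A_eval, B_eval]
  have eA : pvSum ["Array", "String", "Hash Table"] topics = pvKeySum "Array" topics + (pvKeySum "String" topics + (pvKeySum "Hash Table" topics + pvSum [] topics)) := by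
    rw [sum_split _ _ (by decide), sum_split _ _ (by decide), sum_split _ _ (by decide)]
  have eD : pvSum ["Dynamic Programming"] topics = pvKeySum "Dynamic Programming" topics + pvSum [] topics := by
    rw [sum_split _ _ (by decide)]
  have eT : pvSum ["Tree", "Binary Tree", "Graph", "Binary Search Tree", "Depth-First Search", "Breadth-First Search"] topics = pvKeySum "Tree" topics + (pvKeySum "Binary Tree" topics + (pvKeySum "Graph" topics + (pvKeySum "Binary Search Tree" topics + (pvKeySum "Depth-First Search" topics + (pvKeySum "Breadth-First Search" topics + pvSum [] topics))))) := by
    rw [sum_split _ _ (by decide), sum_split _ _ (by decide), sum_split _ _ (by decide),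
        sum_split _ _ (by decide), sum_split _ _ (by decide), sum_split _ _ (by decide)]
  have eS : pvSum ["Design", "System Design"] topics = pvKeySum "Design" topics + (pvKeySum "System Design" topics + pvSum [] topics) := by
    rw [sum_split _ _ (by decide), sum_split _ _ (by decide)]
  rw [eA, eD, eT, eS, pvSum_nil]
  simp only [← key_sum _ _ hpre, List.cons.injEq, Prod.mk.injEq]
  refine ⟨⟨trivial, by omega⟩, ⟨trivial, by omega⟩, ⟨trivial, by omega⟩, ⟨trivial, by omega⟩, trivial⟩

-- ===== VERDICT (by name: the statement is the Claim_ definition above) =====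
theorem map_topics_to_learning_paths_spec : Claim_equal_map_topics_to_learning_paths := by
  intro topics _ hpre
  unfold Spec_map_topics_to_learning_paths
  exact final topics hpre
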